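-- pv_equiv track=rewrite | github.com/r41ngee/vigenere | vigenere/fill.py | word_fill
-- ===== SOURCE A (Python) =====
-- def word_fill(key: str, word_size: int) -> str:
--     if len(key) > word_size:
--         return key[:word_size]
--     elif len(key) == word_size:
--         return key
--     else:
--         tempkey = key
--         for i in range(len(key), word_size):
--             tempkey += key[i % len(key)]
--
--         return tempkey
-- ===== SOURCE B (Python) =====
-- def word_fill(key: str, word_size: int) -> str:
--     if len(key) >= word_size:
--         return key[:word_size]
--     return (key * (word_size // len(key) + 1))[:word_size]
-- ===== Notes on version B (the rewrite author's own statement) =====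
-- stated objective: simpler
-- what changed: Replaced the three-way branch with per-character index-modulo appending by a single length guard plus the closed form (key * (word_size // len(key) + 1))[:word_size], eliminating the loop.
import Mathlib
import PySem

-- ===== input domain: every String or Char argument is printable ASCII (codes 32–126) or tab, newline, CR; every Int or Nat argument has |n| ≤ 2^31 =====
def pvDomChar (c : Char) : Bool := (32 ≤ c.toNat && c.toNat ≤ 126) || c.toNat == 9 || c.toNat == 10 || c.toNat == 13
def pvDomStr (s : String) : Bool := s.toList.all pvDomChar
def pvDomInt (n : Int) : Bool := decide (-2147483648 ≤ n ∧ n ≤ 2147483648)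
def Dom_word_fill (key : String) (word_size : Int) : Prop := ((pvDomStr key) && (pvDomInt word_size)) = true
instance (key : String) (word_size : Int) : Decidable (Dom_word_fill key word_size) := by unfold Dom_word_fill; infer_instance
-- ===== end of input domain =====

-- B replaces A's per-character index-modulo loop by one guard plus the closed form
-- (key * (word_size // len(key) + 1))[:word_size] (objective: simpler).

-- ===== PORT A =====
-- literal port: the three branches, then the loop 'for i in range(len(key), word_size): tempkey += key[i % len(key)]'
-- (pyGetD is the total form of key[i % len(key)]; Pre_ guarantees len(key) ≠ 0 in the loop branch, so the index is in range)
def word_fill (key : String) (word_size : Int) : String :=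
  let cs := key.toList
  if PySem.List.len cs > word_size then
    String.ofList (PySem.List.slice cs none (some word_size))
  else if PySem.List.len cs = word_size then
    key
  else
    String.ofList
      ((PySem.List.pyRange (PySem.List.len cs) word_size 1).foldl
        (fun tempkey i => tempkey ++ [PySem.List.pyGetD cs (PySem.Int.mod i (PySem.List.len cs)) ' '])
        cs)

-- ===== PORT B =====
-- literal port of Source B: guard, else closed form; 'key * n' is flatten (replicate n key)
-- (floordiv is word_size // len(key); Pre_ guarantees len(key) ≠ 0 in the else branch)
def word_fill_alt (key : String) (word_size : Int) : String :=
  let cs := key.toList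
  if word_size ≤ PySem.List.len cs then
    String.ofList (PySem.List.slice cs none (some word_size))
  else
    String.ofList
      (PySem.List.slice
        (List.flatten (List.replicate (PySem.Int.floordiv word_size (PySem.List.len cs) + 1).toNat cs))
        none (some word_size))

-- ===== PRECONDITION & SPEC =====
-- Pre_ excludes exactly the inputs where A raises ZeroDivisionError (key = '' with word_size > 0: 'i % len(key)' with len 0);
-- B's '//' raises there too.
def Pre_word_fill (key : String) (word_size : Int) : Prop :=
  key.toList ≠ [] ∨ word_size ≤ 0
instance (key : String) (word_size : Int) : Decidable (Pre_word_fill key word_size) := by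
  unfold Pre_word_fill; infer_instance

def pvWitness_word_fill : String × Int := ("abc", 7)

def Spec_word_fill (key : String) (word_size : Int) (out : String) : Prop := out = word_fill_alt key word_size
instance (key : String) (word_size : Int) (out : String) : Decidable (Spec_word_fill key word_size out) := by unfold Spec_word_fill; infer_instance

-- ===== CLAIM (what is proved, stated in full; the proofs are below) =====
def Claim_equal_word_fill : Prop := ∀ (key : String) (word_size : Int), Dom_word_fill key word_size → Pre_word_fill key word_size → Spec_word_fill key word_size (word_fill key word_size)

-- ===== LEMMAS AND PROOFS =====

-- index into the r-fold repetition of cs: element j is cs[j % n]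
lemma getElem?_flatten_replicate {α : Type} (cs : List α) (r j : Nat)
    (hcs : cs ≠ []) (hj : j < r * cs.length) :
    (List.flatten (List.replicate r cs))[j]? = cs[j % cs.length]? := by
  induction r generalizing j with
  | zero => omega
  | succ r ih =>
    have hn : 0 < cs.length := List.length_pos_iff.mpr hcs
    have hj2 : j < r * cs.length + cs.length := by
      simpa [Nat.succ_mul] using hj
    rw [List.replicate_succ, List.flatten_cons]
    by_cases h : j < cs.length
    · rw [List.getElem?_append_left h, Nat.mod_eq_of_lt h]
    · rw [List.getElem?_append_right (by omega), ih (j - cs.length) (by omega)]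
      congr 1
      exact (Nat.mod_eq_sub_mod (by omega)).symm

-- the loop of A, run for m more steps, extends cs to the first n+m characters of the repetition
lemma word_fill_loop_eq (cs : List Char) (hcs : cs ≠ []) (r m : Nat)
    (hr : cs.length + m ≤ r * cs.length) :
    (PySem.List.pyRange (cs.length : Int) ((cs.length : Int) + (m : Int)) 1).foldl
        (fun tempkey i => tempkey ++ [PySem.List.pyGetD cs (PySem.Int.mod i ((cs.length : Int))) ' '])
        cs
      = (List.flatten (List.replicate r cs)).take (cs.length + m) := by
  have hn : 0 < cs.length := List.length_pos_iff.mpr hcs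
  induction m with
  | zero =>
    rw [PySem.List.pyRange_one_eq_nil (by omega)]
    simp only [List.foldl_nil]
    cases r with
    | zero => omega
    | succ r =>
      rw [List.replicate_succ, List.flatten_cons, Nat.add_zero, List.take_left]
  | succ m ih =>
    have hr' : cs.length + m ≤ r * cs.length := by omega
    have hcast : (cs.length : Int) + ((m : Int) + 1) = ((cs.length : Int) + (m : Int)) + 1 := by ring
    push_cast
    rw [hcast, PySem.List.pyRange_one_succ_right (by omega), List.foldl_append, ih hr']
    simp only [List.foldl_cons, List.foldl_nil]
    have hmod : PySem.Int.mod ((cs.length : Int) + (m : Int)) ((cs.length : Int))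
        = (((cs.length + m) % cs.length : Nat) : Int) := by
      exact_mod_cast PySem.Int.mod_natCast (cs.length + m) cs.length
    rw [hmod, PySem.List.pyGetD_natCast]
    have hidx : (List.flatten (List.replicate r cs))[cs.length + m]? = cs[(cs.length + m) % cs.length]? :=
      getElem?_flatten_replicate cs r (cs.length + m) hcs (by omega)
    have hlt : (cs.length + m) % cs.length < cs.length := Nat.mod_lt _ hn
    rw [show cs.length + (m + 1) = (cs.length + m) + 1 from rfl, List.take_add_one, hidx,
      List.getElem?_eq_getElem hlt]
    simp only [Option.toList_some]
    simp only [Nat.add_mod_left]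
    rw [List.getD_eq_getElem cs ' ' (Nat.mod_lt m hn)]

theorem word_fill_spec : Claim_equal_word_fill := by
  intro key ws _ hpre
  unfold Spec_word_fill word_fill word_fill_alt
  simp only [PySem.List.len_eq]
  set cs := key.toList with hcs
  by_cases h1 : (cs.length : Int) > ws
  · rw [if_pos h1, if_pos (le_of_lt h1)]
  · rw [if_neg h1]
    by_cases h2 : (cs.length : Int) = ws
    · rw [if_pos h2, if_pos (le_of_eq h2.symm)]
      rw [← h2, PySem.List.slice_to_natCast, List.take_length, hcs, String.ofList_toList]
    · rw [if_neg h2, if_neg (by omega)]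
      -- loop branch: cs.length < ws, so by Pre_ cs ≠ []
      have hlt : (cs.length : Int) < ws := by omega
      have hne : cs ≠ [] := by
        rcases hpre with h | h
        · exact h
        · exfalso
          have h0 : (0:Int) ≤ (cs.length : Int) := by positivity
          omega
      have hn : 0 < cs.length := List.length_pos_iff.mpr hne
      set m : Nat := (ws - (cs.length : Int)).toNat with hm
      have hws : ws = (cs.length : Int) + (m : Int) := by omega
      set r : Nat := (PySem.Int.floordiv ws (cs.length : Int) + 1).toNat with hrdef
      have hfd : PySem.Int.floordiv ws (cs.length : Int)
          = (((cs.length + m) / cs.length : Nat) : Int) := by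
        rw [PySem.Int.floordiv_eq_ediv_of_pos (by exact_mod_cast hn), hws]
        exact_mod_cast (Int.ofNat_ediv_ofNat (a := cs.length + m) (b := cs.length)).symm
      have hrval : r = (cs.length + m) / cs.length + 1 := by
        rw [hrdef, hfd,
          show ((((cs.length + m) / cs.length : Nat) : Int) + 1)
              = (((cs.length + m) / cs.length + 1 : Nat) : Int) by push_cast; ring]
        exact Int.toNat_natCast _
      have hr : cs.length + m ≤ r * cs.length := by
        rw [hrval]
        have ha := Nat.div_add_mod (cs.length + m) cs.length
        have hb := Nat.mod_lt (cs.length + m) hn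
        nlinarith
      rw [hws, word_fill_loop_eq cs hne r m hr,
        PySem.List.slice_to ((List.replicate r cs).flatten) (by omega)]
      congr 2
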